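-- pv_equiv track=rewrite | github.com/Dummy-Bug/Data-Structures-and-Algorithms | 6 InterviewBit/05 Bit Manipulation/4 Additional Practice/1 Flipping Bits.py | solve
-- ===== SOURCE A (Python) =====
-- def solve(A):
--
--     msb = None;
--     for i in range(31,-1,-1):
--         if (A>>i)&1 == 1:
--             msb = i;
--             break;
--     result = 0;
--
--     for i in range(msb+1):
--
--         if (A>>i)&1 != 1:
--             result += 1<<i;
--
--     return result;
-- ===== SOURCE B (Python) =====
-- def solve(A):
--     # Closed form: msb+1 = 32 for negatives (sign bit), else A.bit_length();
--     # flipping bits 0..msb of A is ~A masked to the low msb+1 bits.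
--     msb = 31 if A < 0 else A.bit_length() - 1
--     return ~A & ((1 << (msb + 1)) - 1)
-- ===== Notes on version B (the rewrite author's own statement) =====
-- stated objective: simpler
-- what changed: Both of A's loops are gone: B computes the MSB position directly with int.bit_length() (31 for negatives, whose sign bit the downward scan finds immediately) and produces the result in closed form by masking the complement ~A down to the bits at and below the MSB, instead of accumulating powers of two bit by bit.
-- outside the precondition, e.g. on solve(0): A raises TypeError, B returns 0
import Mathlib
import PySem

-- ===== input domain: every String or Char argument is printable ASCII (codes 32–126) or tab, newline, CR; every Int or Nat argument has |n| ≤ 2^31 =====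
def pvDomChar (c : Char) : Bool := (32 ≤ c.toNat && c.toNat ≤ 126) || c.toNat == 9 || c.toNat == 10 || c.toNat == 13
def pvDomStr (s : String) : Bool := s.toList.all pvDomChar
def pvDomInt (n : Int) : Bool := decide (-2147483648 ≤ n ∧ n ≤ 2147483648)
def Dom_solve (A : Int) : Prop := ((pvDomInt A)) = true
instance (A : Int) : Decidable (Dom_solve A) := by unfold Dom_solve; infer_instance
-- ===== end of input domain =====

-- B replaces both of A's loops by a direct bit_length/closed-form bitmask computation (objective: simpler).


-- ===== PORT A =====
-- one iteration of the MSB scan (Python's 'break' is emulated by keeping a found value unchanged);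
-- the loop index i is always in 0..31 here, so 'i.toNat' is exact for Python's 'A >> i'
def solveScanStep (A : Int) (msb : Option Int) (i : Int) : Option Int :=
  match msb with
  | some m => some m
  | none => if PySem.Int.band (A >>> i.toNat) 1 == 1 then some i else none

-- one iteration of the accumulation loop ('result += 1 << i' when bit i is clear)
def solveLoopStep (A : Int) (result : Int) (i : Int) : Int :=
  if PySem.Int.band (A >>> i.toNat) 1 != 1 then result + (1 <<< i.toNat) else result

def solve (A : Int) : Int :=
  match (PySem.List.pyRange 31 (-1) (-1)).foldl (solveScanStep A) none with
  | none => 0   -- Python: msb is None and 'range(msb + 1)' raises TypeError; excluded by Pre_solve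
  | some m => (PySem.List.pyRange 0 (m + 1)).foldl (solveLoopStep A) 0

-- ===== PORT B =====
def solve_alt (A : Int) : Int :=
  -- msb + 1 ≥ 0 always (msb ≥ -1), so '.toNat' is exact for Python's '1 << (msb + 1)'
  let msb : Int := if A < 0 then 31 else (PySem.Int.bitLength A : Int) - 1
  PySem.Int.band (Int.not A) ((1 <<< (msb + 1).toNat) - 1)

-- ===== PRECONDITION & SPEC =====
-- Pre_ excludes only A = 0: there the scan finds no set bit, msb stays None and
-- Python's 'range(msb + 1)' raises TypeError (A returns no value).
def Pre_solve (A : Int) : Prop := A ≠ 0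
instance (A : Int) : Decidable (Pre_solve A) := by unfold Pre_solve; infer_instance
def pvWitness_solve : Int := 5

def Spec_solve (A : Int) (out : Int) : Prop := out = solve_alt A
instance (A : Int) (out : Int) : Decidable (Spec_solve A out) := by unfold Spec_solve; infer_instance

-- ===== CLAIM (what is proved, stated in full; the proofs are below) =====
def Claim_equal_solve : Prop := ∀ (A : Int), Dom_solve A → Pre_solve A → Spec_solve A (solve A)

-- ===== LEMMAS AND PROOFS =====

-- Python's '~A' is -A-1
lemma int_not_eq (A : Int) : Int.not A = -A - 1 := by
  cases A <;> simp [Int.not, Int.negSucc_eq] <;> try ring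

-- the tested bit '(A >> n) & 1' is the n-th binary digit (A / 2^n) % 2
lemma bit_eq (A : Int) (n : Nat) : PySem.Int.band (A >>> n) 1 = (A / 2 ^ n) % 2 := by
  rw [PySem.Int.band_one, Int.shiftRight_eq_div_pow]
  show Int.fmod _ _ = _
  rw [Int.fmod_eq_emod]; simp

-- once msb is found the rest of the scan keeps it
lemma scan_some (A : Int) (l : List Int) (m : Int) :
    l.foldl (solveScanStep A) (some m) = some m := by
  induction l with
  | nil => rfl
  | cons x xs ih => simpa [solveScanStep] using ih

-- the downward scan finds the highest set bit below k
lemma scan_find (A : Int) (m : Nat) : ∀ k : Nat, m < k →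
    PySem.Int.band (A >>> m) 1 = 1 →
    (∀ j : Nat, m < j → j < k → PySem.Int.band (A >>> j) 1 ≠ 1) →
    (PySem.List.pyRange ((k : Int) - 1) (-1) (-1)).foldl (solveScanStep A) none = some (m : Int) := by
  intro k
  induction k with
  | zero => omega
  | succ k ih =>
    intro hmk hbit hup
    have hc : ((k + 1 : Nat) : Int) - 1 = (k : Int) := by push_cast; ring
    rw [hc, PySem.List.pyRange_neg_one_cons (by omega)]
    rcases Nat.lt_or_ge m k with h | h
    · have hcond : (PySem.Int.band (A >>> ((k : Int)).toNat) 1 == 1) = false := by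
        have := hup k h (by omega)
        simpa [Int.toNat_natCast] using this
      simp only [List.foldl_cons, solveScanStep, hcond]
      exact ih h hbit (fun j h1 h2 => hup j h1 (by omega))
    · have hmk' : m = k := by omega
      subst hmk'
      have hcond : (PySem.Int.band (A >>> ((m : Int)).toNat) 1 == 1) = true := by
        simpa [Int.toNat_natCast] using hbit
      simp only [List.foldl_cons, solveScanStep, hcond]
      exact scan_some A _ _

-- x % 2^(n+1) adds the n-th digit on top of x % 2^n
lemma emod_step (x : Int) (n : Nat) :
    x % 2 ^ (n + 1) = x % 2 ^ n + 2 ^ n * ((x / 2 ^ n) % 2) := by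
  have hp : (0 : Int) < 2 ^ n := by positivity
  have hx := Int.mul_ediv_add_emod x (2 ^ n)
  have hr0 := Int.emod_nonneg x (ne_of_gt hp)
  have hr1 := Int.emod_lt_of_pos x hp
  set q := x / 2 ^ n with hq
  set r := x % 2 ^ n with hr
  have hq2 : q % 2 = 0 ∨ q % 2 = 1 := by omega
  have hqd : q = 2 * (q / 2) + q % 2 := by omega
  have hxs : x = 2 ^ (n + 1) * (q / 2) + (2 ^ n * (q % 2) + r) := by
    rw [pow_succ]; nlinarith [hx, hqd]
  have hb : 0 ≤ 2 ^ n * (q % 2) + r ∧ 2 ^ n * (q % 2) + r < 2 ^ (n + 1) := by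
    rcases hq2 with h | h <;> simp [h, pow_succ] <;> omega
  calc x % 2 ^ (n + 1) = (2 ^ n * (q % 2) + r + 2 ^ (n + 1) * (q / 2)) % 2 ^ (n + 1) := by
        rw [show x = 2 ^ n * (q % 2) + r + 2 ^ (n + 1) * (q / 2) by linarith [hxs]]
    _ = (2 ^ n * (q % 2) + r) % 2 ^ (n + 1) := by
        rw [Int.add_mul_emod_self_left]
    _ = 2 ^ n * (q % 2) + r := Int.emod_eq_of_lt hb.1 hb.2
    _ = r + 2 ^ n * (q % 2) := by ring

-- the low n bits of -A-1 are the complement of the low n bits of A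
lemma negmod (A : Int) (n : Nat) : (-A - 1) % 2 ^ n = 2 ^ n - 1 - A % 2 ^ n := by
  have hp : (0 : Int) < 2 ^ n := by positivity
  have hr0 := Int.emod_nonneg A (ne_of_gt hp)
  have hr1 := Int.emod_lt_of_pos A hp
  have hx := Int.mul_ediv_add_emod A (2 ^ n)
  have h := (Int.ediv_emod_unique (a := -A - 1) (b := 2 ^ n)
    (r := 2 ^ n - 1 - A % 2 ^ n) (q := -(A / 2 ^ n) - 1) hp).mpr
    ⟨by linarith [hx], by omega, by omega⟩
  exact h.2

-- the accumulation loop builds exactly the low-n-bit complement of A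
lemma sum_loop (A : Int) (n : Nat) :
    (PySem.List.pyRange 0 ((n : Int))).foldl (solveLoopStep A) 0 = (-A - 1) % 2 ^ n := by
  induction n with
  | zero => simp [PySem.List.pyRange_one_eq_nil]
  | succ n ih =>
    have hc : ((n + 1 : Nat) : Int) = (n : Int) + 1 := by push_cast; ring
    rw [hc, PySem.List.pyRange_one_succ_right (by positivity), List.foldl_append, ih]
    have hb : PySem.Int.band (A >>> ((n : Int)).toNat) 1 = (A / 2 ^ n) % 2 := by
      simpa [Int.toNat_natCast] using bit_eq A n
    have hq2 : (A / 2 ^ n) % 2 = 0 ∨ (A / 2 ^ n) % 2 = 1 := by omega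
    have hstep := emod_step (-A - 1) n
    have hd : (-A - 1) / 2 ^ n % 2 = 1 - (A / 2 ^ n) % 2 := by
      have hp : (0 : Int) < 2 ^ n := by positivity
      have hr0 := Int.emod_nonneg A (ne_of_gt hp)
      have hr1 := Int.emod_lt_of_pos A hp
      have hx := Int.mul_ediv_add_emod A (2 ^ n)
      have h := (Int.ediv_emod_unique (a := -A - 1) (b := 2 ^ n)
        (r := 2 ^ n - 1 - A % 2 ^ n) (q := -(A / 2 ^ n) - 1) hp).mpr
        ⟨by linarith [hx], by omega, by omega⟩
      rw [h.1]; omega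
    simp only [List.foldl_cons, List.foldl_nil, solveLoopStep, hb]
    rcases hq2 with h | h
    · simp only [h, hstep, hd]
      norm_num [Int.toNat_natCast, Nat.shiftLeft_eq]
    · simp only [h, hstep, hd]
      norm_num

-- 'x & (2^n - 1)' keeps the low n bits: x % 2^n for nonnegative x …
lemma band_nonneg_mask (x : Int) (hx : 0 ≤ x) (n : Nat) :
    PySem.Int.band x (2 ^ n - 1) = x % 2 ^ n := by
  have h1 : (1:Int) ≤ 2 ^ n := by exact_mod_cast Nat.one_le_two_pow
  rw [PySem.Int.band_of_nonneg hx (by omega)]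
  have ht : ((2:Int) ^ n - 1).toNat = 2 ^ n - 1 := by
    rw [show ((2:Int)^n - 1) = ((2^n - 1 : Nat) : Int) by
      push_cast [Nat.cast_sub Nat.one_le_two_pow]; ring]
    exact Int.toNat_natCast _
  rw [ht, Nat.and_two_pow_sub_one_eq_mod]
  rw [show x = (x.toNat : Int) by omega]
  push_cast
  simp

-- … and the complement of the low n bits of -x-1 for negative x
lemma band_neg_mask (x : Int) (hx : x < 0) (n : Nat) :
    PySem.Int.band x (2 ^ n - 1) = 2 ^ n - 1 - (-x - 1) % 2 ^ n := by
  have h1 : (1:Int) ≤ 2 ^ n := by exact_mod_cast Nat.one_le_two_pow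
  have hy : (0:Int) ≤ -x - 1 := by omega
  rw [show PySem.Int.band x (2^n-1) = ↑(((2:Int)^n-1).toNat - (((2:Int)^n-1).toNat &&& (-x - 1).toNat)) by
    simp only [PySem.Int.band, if_neg (by omega : ¬ (0:Int) ≤ x), if_pos (by omega : (0:Int) ≤ 2^n - 1)]]
  have ht : ((2:Int) ^ n - 1).toNat = 2 ^ n - 1 := by
    rw [show ((2:Int)^n - 1) = ((2^n - 1 : Nat) : Int) by
      push_cast [Nat.cast_sub Nat.one_le_two_pow]; ring]
    exact Int.toNat_natCast _
  rw [ht, Nat.land_comm, Nat.and_two_pow_sub_one_eq_mod]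
  have hmlt : (-x - 1).toNat % 2 ^ n < 2 ^ n := Nat.mod_lt _ (by positivity)
  have e1 : ((2 ^ n - 1 : Nat) : Int) = (2:Int) ^ n - 1 := by
    push_cast [Nat.cast_sub Nat.one_le_two_pow]; ring
  push_cast [Nat.cast_sub (by omega : (-x - 1).toNat % 2 ^ n ≤ 2 ^ n - 1)]
  rw [e1]
  rw [Int.toNat_of_nonneg (by omega : (0:Int) ≤ -x - 1)]

-- ===== VERDICT (by name: the statement is the Claim_ definition above) =====
theorem solve_spec : Claim_equal_solve := by
  intro A hdom hpre
  unfold Spec_solve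
  have hdom' : -2147483648 ≤ A ∧ A ≤ 2147483648 := by
    simpa [Dom_solve, pvDomInt] using hdom
  have h31 : ((2:Int)) ^ (31:Nat) = 2147483648 := by norm_num
  rcases lt_trichotomy A 0 with hA | hA | hA
  · -- A < 0 : the sign bit makes the scan stop at i = 31 immediately
    have hbit : PySem.Int.band (A >>> (31:Nat)) 1 = 1 := by
      rw [bit_eq]
      have hdiv : A / 2 ^ (31:Nat) = -1 := by
        exact ((Int.ediv_emod_unique (a := A) (b := 2 ^ (31:Nat))
          (r := A + 2 ^ (31:Nat)) (q := -1) (by positivity)).mpr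
          ⟨by ring, by omega, by omega⟩).1
      rw [hdiv]; decide
    have hscan := scan_find A 31 32 (by omega) hbit (fun j h1 h2 => absurd h2 (by omega))
    rw [show ((32:Nat):Int) - 1 = 31 by norm_num] at hscan
    unfold solve
    rw [hscan]
    show List.foldl (solveLoopStep A) 0 (PySem.List.pyRange 0 (((31:Nat):Int) + 1)) = solve_alt A
    rw [show ((31:Nat):Int) + 1 = ((32:Nat):Int) by norm_num, sum_loop A 32]
    unfold solve_alt
    rw [if_pos hA, int_not_eq]
    show (-A - 1) % 2 ^ (32:Nat)
      = PySem.Int.band (-A - 1) (((1 <<< (((31:Int)) + 1).toNat : Nat) : Int) - 1)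
    rw [show (((31:Int)) + 1).toNat = (32:Nat) by decide]
    rw [show (((1 <<< (32:Nat) : Nat) : Int)) - 1 = 2 ^ (32:Nat) - 1 by
      push_cast [Nat.shiftLeft_eq]]
    rw [band_nonneg_mask (-A - 1) (by omega) 32]
    push_cast
    ring
  · exact absurd hA hpre
  · -- 0 < A : the scan stops at the bit-length position
    have hub := PySem.Int.lt_two_pow_bitLength A
    have hlb := PySem.Int.two_pow_bitLength_le A hpre
    set L := PySem.Int.bitLength A with hLdef
    have hNA : (A.natAbs : Int) = A := Int.natAbs_of_nonneg (le_of_lt hA)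
    have hL1 : 1 ≤ L := by
      by_contra h
      have : L = 0 := by omega
      rw [this] at hub
      have : A.natAbs = 0 := by omega
      omega
    set m := L - 1 with hmdef
    have hLm : L = m + 1 := by omega
    have hNAle : A.natAbs ≤ 2 ^ 31 := by
      have h2 : ((2 ^ 31 : Nat) : Int) = 2147483648 := by norm_num
      omega
    have hm31 : m ≤ 31 :=
      (Nat.pow_le_pow_iff_right (by omega)).mp (le_trans hlb hNAle)
    have hA2 : (2:Int) ^ m ≤ A := by
      calc ((2:Int)) ^ m = ((2 ^ m : Nat) : Int) := by push_cast; ring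
        _ ≤ (A.natAbs : Int) := by exact_mod_cast hlb
        _ = A := hNA
    have hA3 : A < (2:Int) ^ (m + 1) := by
      rw [hLm] at hub
      calc A = (A.natAbs : Int) := hNA.symm
        _ < ((2 ^ (m + 1) : Nat) : Int) := by exact_mod_cast hub
        _ = (2:Int) ^ (m + 1) := by push_cast; ring
    have hbitm : PySem.Int.band (A >>> m) 1 = 1 := by
      rw [bit_eq]
      have hdiv : A / 2 ^ m = 1 := by
        exact ((Int.ediv_emod_unique (a := A) (b := 2 ^ m)
          (r := A - 2 ^ m) (q := 1) (by positivity)).mpr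
          ⟨by ring, by omega, by linarith [hA3, pow_succ (2:Int) m]⟩).1
      rw [hdiv]; decide
    have hup : ∀ j : Nat, m < j → j < 32 → PySem.Int.band (A >>> j) 1 ≠ 1 := by
      intro j h1 h2
      rw [bit_eq]
      have hdiv : A / 2 ^ j = 0 := by
        apply Int.ediv_eq_zero_of_lt (le_of_lt hA)
        calc A < (2:Int) ^ (m + 1) := hA3
          _ ≤ (2:Int) ^ j := by
            apply pow_le_pow_right₀ (by omega) (by omega)
      rw [hdiv]; decide
    have hscan := scan_find A m 32 (by omega) hbitm hup
    rw [show ((32:Nat):Int) - 1 = 31 by norm_num] at hscan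
    unfold solve
    rw [hscan]
    show List.foldl (solveLoopStep A) 0 (PySem.List.pyRange 0 (((m:Nat):Int) + 1)) = solve_alt A
    rw [show ((m:Nat):Int) + 1 = ((m + 1:Nat):Int) by push_cast; ring, sum_loop A (m + 1)]
    unfold solve_alt
    rw [if_neg (by omega : ¬ A < 0)]
    show (-A - 1) % 2 ^ (m + 1)
      = PySem.Int.band (Int.not A) (((1 <<< (((L:Int)) - 1 + 1).toNat : Nat) : Int) - 1)
    rw [show ((L:Int) - 1 + 1) = (L:Int) by ring, Int.toNat_natCast]
    rw [show (((1 <<< L : Nat) : Int)) - 1 = 2 ^ L - 1 by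
      push_cast [Nat.shiftLeft_eq]; ring]
    rw [int_not_eq, band_neg_mask (-A - 1) (by omega) L]
    rw [show (-(-A - 1) - 1) = A by ring]
    push_cast
    rw [negmod A (m + 1), ← hLm]
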